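-- pv_equiv track=rewrite | github.com/quincy-costello/usaco-training | barn1/barn1.py | count_boards
-- ===== SOURCE A (Python) =====
-- def count_boards(stalls):
--     count = 0
--     for i in range(len(stalls)):
--         if stalls[i][1]:
--             if i == 0:
--                 count += 1
--             elif not stalls[i-1][1]:
--                 count += 1
--
--     return count
-- ===== SOURCE B (Python) =====
-- def count_boards(stalls):
--     occ = [bool(s[1]) for s in stalls]
--     return sum(occ) - sum(1 for a, b in zip(occ, occ[1:]) if a and b)
-- ===== Notes on version B (the rewrite author's own statement) =====
-- stated objective: alternative
-- what changed: Replaces index-based edge detection (comparing each stall to its predecessor via i-1 lookups) with a closed arithmetic decomposition: number of occupied stalls minus number of adjacent occupied-occupied pairs, computed from an occupancy list and a zip with its shift.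
import Mathlib
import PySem

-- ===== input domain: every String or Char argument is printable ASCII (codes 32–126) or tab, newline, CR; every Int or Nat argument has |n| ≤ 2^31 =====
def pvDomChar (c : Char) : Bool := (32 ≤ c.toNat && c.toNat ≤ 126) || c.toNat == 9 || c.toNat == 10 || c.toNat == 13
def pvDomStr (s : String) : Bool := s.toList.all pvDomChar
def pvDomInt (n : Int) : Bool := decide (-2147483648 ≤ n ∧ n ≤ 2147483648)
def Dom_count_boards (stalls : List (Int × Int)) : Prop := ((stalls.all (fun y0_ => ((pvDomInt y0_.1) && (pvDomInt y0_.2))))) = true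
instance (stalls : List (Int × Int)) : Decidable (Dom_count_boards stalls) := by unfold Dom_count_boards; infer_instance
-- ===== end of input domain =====

-- B replaces A's index-based run-edge detection with "occupied count minus adjacent occupied pairs" (alternative decomposition, same cost).


-- ===== PORT A =====
-- literal transliteration: loop over indices, compare stalls[i][1] and stalls[i-1][1]
def count_boards (stalls : List (Int × Int)) : Int :=
  (List.range stalls.length).foldl
    (fun count i =>
      if ((stalls[i]?.map Prod.snd).getD 0) ≠ 0 then
        if i = 0 then count + 1
        else if ¬ (((stalls[i-1]?.map Prod.snd).getD 0) ≠ 0) then count + 1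
        else count
      else count) 0

-- ===== PORT B =====
-- occupancy list; (count of occupied) - (count of adjacent occupied-occupied pairs)
def count_boards_alt (stalls : List (Int × Int)) : Int :=
  let occ : List Bool := stalls.map (fun s => decide (s.2 ≠ 0))
  ((occ.filter id).length : Int)
    - (((occ.zip occ.tail).filter (fun p => p.1 && p.2)).length : Int)

-- ===== PRECONDITION & SPEC =====
def Spec_count_boards (stalls : List (Int × Int)) (out : Int) : Prop := out = count_boards_alt stalls
instance (stalls : List (Int × Int)) (out : Int) : Decidable (Spec_count_boards stalls out) := by unfold Spec_count_boards; infer_instance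

-- ===== CLAIM (what is proved, stated in full; the proofs are below) =====
def Claim_equal_count_boards : Prop := ∀ (stalls : List (Int × Int)), Dom_count_boards stalls → Spec_count_boards stalls (count_boards stalls)

-- ===== LEMMAS AND PROOFS =====

-- A's per-index increment, generalized over the occupancy of the (virtual) predecessor p
def pvG (p : Bool) (xs : List (Int × Int)) (i : Nat) : Int :=
  if (((xs[i]?.map Prod.snd).getD 0) ≠ 0) ∧
     (if i = 0 then p = false else ¬ (((xs[i-1]?.map Prod.snd).getD 0) ≠ 0))
  then 1 else 0

-- runs of true, given the previous occupancy flag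
def pvRuns : Bool → List Bool → Int
  | _, [] => 0
  | prev, b :: rest => (if b = true ∧ prev = false then 1 else 0) + pvRuns b rest

def pvOcc (xs : List (Int × Int)) : List Bool := xs.map (fun s => decide (s.2 ≠ 0))

theorem pvG_shift (p : Bool) (y : Int × Int) (ys : List (Int × Int)) (i : Nat) :
    pvG p (y :: ys) (i + 1) = pvG (decide (y.2 ≠ 0)) ys i := by
  unfold pvG
  rcases i with _ | j <;> simp

theorem pv_fold_runs (xs : List (Int × Int)) (p : Bool) (c : Int) :
    (List.range xs.length).foldl (fun c i => c + pvG p xs i) c = c + pvRuns p (pvOcc xs) := by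
  induction xs generalizing p c with
  | nil => simp [pvOcc, pvRuns]
  | cons y ys ih =>
    have h0 : (y :: ys).length = ys.length + 1 := rfl
    rw [h0, List.range_succ_eq_map, List.foldl_cons, List.foldl_map]
    have hfun : (fun (c : Int) (i : Nat) => c + pvG p (y :: ys) (i + 1))
        = (fun (c : Int) (i : Nat) => c + pvG (decide (y.2 ≠ 0)) ys i) := by
      funext c i; rw [pvG_shift]
    rw [hfun, ih]
    have hg0 : pvG p (y :: ys) 0 = (if (decide (y.2 ≠ 0)) = true ∧ p = false then 1 else 0) := by
      unfold pvG; by_cases h : y.2 = 0 <;> simp [h]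
    simp only [pvOcc, List.map_cons, pvRuns, hg0]
    ring

theorem pv_runs_formula (l : List Bool) (p : Bool) :
    pvRuns p l = ((l.filter id).length : Int)
      - (((l.zip l.tail).filter (fun q => q.1 && q.2)).length : Int)
      - (if p && l.headD false then 1 else 0) := by
  induction l generalizing p with
  | nil => simp [pvRuns]
  | cons b rest ih =>
    rw [pvRuns, ih b]
    rcases rest with _ | ⟨r, rs⟩
    · cases b <;> cases p <;> simp
    · cases b <;> cases p <;> cases r <;>
        simp [List.filter, List.zip] <;> ring

theorem count_boards_eq_fold (stalls : List (Int × Int)) :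
    count_boards stalls
      = (List.range stalls.length).foldl (fun c i => c + pvG false stalls i) 0 := by
  unfold count_boards
  congr 1
  funext c i
  unfold pvG
  by_cases h1 : ((stalls[i]?.map Prod.snd).getD 0) ≠ 0
  · by_cases h2 : i = 0
    · simp [h2]; split_ifs with h <;> simp_all
    · by_cases h3 : ((stalls[i-1]?.map Prod.snd).getD 0) ≠ 0 <;> simp [h1, h2, h3]
  · simp [h1]

-- ===== VERDICT (by name: the statement is the Claim_ definition above) =====
theorem count_boards_spec : Claim_equal_count_boards := by
  intro stalls _
  unfold Spec_count_boards count_boards_alt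
  rw [count_boards_eq_fold, pv_fold_runs, pv_runs_formula]
  simp [pvOcc]
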